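-- pv_equiv track=rewrite | github.com/NorbertWatroba/Graphs | Graph.py | _generate
-- ===== SOURCE A (Python) =====
-- def _generate(size: int, saturation: int = 100) -> dict[str, list[str]]:
--     max_edges = size * (size - 1) // 2
--     num_edges = saturation * max_edges // 100
--     graph: dict[str, list[str]] = {str(k): [] for k in range(1, size+1)}
--     current = 1
--     edge = 2
--     for _ in range(num_edges):
--         if edge > size:
--             current += 1
--             edge = current + 1
--         graph[str(current)].append(str(edge))
--         edge += 1
--     return graph
-- ===== SOURCE B (Python) =====
-- def _generate(size: int, saturation: int = 100) -> dict[str, list[str]]: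
--     max_edges = size * (size - 1) // 2
--     remaining = saturation * max_edges // 100
--     graph: dict[str, list[str]] = {}
--     for current in range(1, size + 1):
--         k = max(0, min(remaining, size - current))
--         graph[str(current)] = [str(j) for j in range(current + 1, current + 1 + k)]
--         remaining -= k
--     return graph
-- ===== Notes on version B (the rewrite author's own statement) =====
-- stated objective: simpler
-- what changed: A's per-edge state machine over range(num_edges) with (current, edge) bookkeeping is replaced by a single loop over nodes that assigns each node its whole neighbour range str(current+1..current+k) at once, where k = min(remaining, size-current).
-- intended difference: When num_edges computes to max_edges + 1 (saturation just above 100), A returns a graph whose last node lists the nonexistent node str(size+1) as a neighbour, while B leaves that node's neighbour list empty; B's value is intended since node size+1 is not part of a graph of `size` nodes. — e.g. on _generate(3, 134): A returns [("1", ["2", "3"]), ("2", ["3"]), ("3", ["4"])], B returns [("1", ["2", "3"]), ("2", ["3"]), ("3", [])]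
import Mathlib
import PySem

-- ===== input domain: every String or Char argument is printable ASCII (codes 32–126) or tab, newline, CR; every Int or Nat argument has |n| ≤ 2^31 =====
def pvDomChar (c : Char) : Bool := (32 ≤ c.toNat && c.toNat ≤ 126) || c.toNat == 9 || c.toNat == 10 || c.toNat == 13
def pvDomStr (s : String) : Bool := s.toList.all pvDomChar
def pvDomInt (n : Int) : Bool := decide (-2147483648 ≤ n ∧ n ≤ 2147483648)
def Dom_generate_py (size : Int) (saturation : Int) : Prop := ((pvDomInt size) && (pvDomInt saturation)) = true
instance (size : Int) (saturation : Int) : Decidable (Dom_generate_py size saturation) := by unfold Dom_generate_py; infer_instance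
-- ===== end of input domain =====

-- B replaces A's per-edge (current, edge) state machine by a per-node batched
-- neighbour-range assignment (simpler decomposition; same cost class).

-- ===== PORT A =====
-- one iteration of A's `for _ in range(num_edges)` loop body
def astep (size : Int) (st : PySem.Dict String (List String) × Int × Int) :
    PySem.Dict String (List String) × Int × Int :=
  let current := if st.2.2 > size then st.2.1 + 1 else st.2.1
  let edge := if st.2.2 > size then current + 1 else st.2.2
  (st.1.modify (PySem.Int.toStr current) [] (fun l => l ++ [PySem.Int.toStr edge]),
   current, edge + 1)

def generate_py (size : Int) (saturation : Int) : List (String × List String) :=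
  let max_edges := PySem.Int.floordiv (size * (size - 1)) 2
  let num_edges := PySem.Int.floordiv (saturation * max_edges) 100
  let graph : PySem.Dict String (List String) :=
    (PySem.List.pyRange 1 (size + 1) 1).foldl
      (fun d k => d.insert (PySem.Int.toStr k) []) PySem.Dict.empty
  ((List.range num_edges.toNat).foldl (fun st _ => astep size st) (graph, 1, 2)).1.items

-- ===== PORT B =====
-- one iteration of B's `for current in range(1, size+1)` loop body
def bstep (size : Int) (st : PySem.Dict String (List String) × Int) (current : Int) :
    PySem.Dict String (List String) × Int :=
  let k := max 0 (min st.2 (size - current))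
  (st.1.insert (PySem.Int.toStr current)
     ((PySem.List.pyRange (current + 1) (current + 1 + k) 1).map PySem.Int.toStr),
   st.2 - k)

def generate_py_alt (size : Int) (saturation : Int) : List (String × List String) :=
  let max_edges := PySem.Int.floordiv (size * (size - 1)) 2
  let remaining := PySem.Int.floordiv (saturation * max_edges) 100
  ((PySem.List.pyRange 1 (size + 1) 1).foldl (bstep size)
      (PySem.Dict.empty, remaining)).1.items

-- ===== PRECONDITION & SPEC =====
-- Pre_ excludes exactly the inputs on which A raises KeyError (num_edges at least
-- max_edges + 2, or a positive num_edges with size < 2); A returns on all of Pre_.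
def Pre_generate_py (size : Int) (saturation : Int) : Prop :=
  saturation * (size * (size - 1) / 2) < 100 ∨
  (2 ≤ size ∧
    saturation * (size * (size - 1) / 2) < (size * (size - 1) / 2 + 2) * 100)
instance (size : Int) (saturation : Int) : Decidable (Pre_generate_py size saturation) := by
  unfold Pre_generate_py; infer_instance
def pvWitness_generate_py : Int × Int := (5, 50)

-- On inputs where num_edges = max_edges + 1 (saturation just above 100), A returns a
-- graph whose last node has the nonexistent node str(size+1) as neighbour; B leaves
-- that node's list empty, the intended value since node size+1 is not in the graph.
def D_generate_py (size : Int) (saturation : Int) : Prop :=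
  2 ≤ size ∧ 100 ≤ (saturation - 100) * (size * (size - 1) / 2) ∧
    (saturation - 100) * (size * (size - 1) / 2) < 200
instance (size : Int) (saturation : Int) : Decidable (D_generate_py size saturation) := by
  unfold D_generate_py; infer_instance

def Spec_generate_py (size : Int) (saturation : Int) (out : List (String × List String)) : Prop :=
  ¬ D_generate_py size saturation → out = generate_py_alt size saturation
instance (size : Int) (saturation : Int) (out : List (String × List String)) :
    Decidable (Spec_generate_py size saturation out) := by
  unfold Spec_generate_py; infer_instance

def pvDiffWitness_generate_py : Int × Int := (3, 134)
def pvDiffWitnessOut_generate_py :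
    (List (String × List String)) × (List (String × List String)) :=
  ([("1", ["2", "3"]), ("2", ["3"]), ("3", ["4"])],
   [("1", ["2", "3"]), ("2", ["3"]), ("3", [])])

-- ===== CLAIM (what is proved, stated in full; the proofs are below) =====
def Claim_unchanged_generate_py : Prop := ∀ (size : Int) (saturation : Int), Dom_generate_py size saturation → Pre_generate_py size saturation → Spec_generate_py size saturation (generate_py size saturation)
def Claim_changed_generate_py : Prop := Dom_generate_py (pvDiffWitness_generate_py.1) (pvDiffWitness_generate_py.2) ∧ Pre_generate_py (pvDiffWitness_generate_py.1) (pvDiffWitness_generate_py.2) ∧ D_generate_py (pvDiffWitness_generate_py.1) (pvDiffWitness_generate_py.2) ∧ generate_py (pvDiffWitness_generate_py.1) (pvDiffWitness_generate_py.2) = pvDiffWitnessOut_generate_py.1 ∧ generate_py_alt (pvDiffWitness_generate_py.1) (pvDiffWitness_generate_py.2) = pvDiffWitnessOut_generate_py.2 ∧ pvDiffWitnessOut_generate_py.1 ≠ pvDiffWitnessOut_generate_py.2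
def Claim_exact_generate_py : Prop := ∀ (size : Int) (saturation : Int), Dom_generate_py size saturation → Pre_generate_py size saturation → D_generate_py size saturation → generate_py size saturation ≠ generate_py_alt size saturation

-- ===== LEMMAS AND PROOFS =====

-- value of a decimal digit string (proof-side helper)
def pvDigitsVal (l : List Char) : Nat := l.foldl (fun a c => 10 * a + (c.toNat - 48)) 0

lemma pvDigitsVal_append (xs : List Char) (c : Char) :
    pvDigitsVal (xs ++ [c]) = 10 * pvDigitsVal xs + (c.toNat - 48) := by
  simp [pvDigitsVal]

lemma pvDigitsVal_toDigits (n : Nat) : pvDigitsVal (Nat.toDigits 10 n) = n := by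
  induction n using Nat.strong_induction_on with
  | _ n ih =>
    by_cases h : n < 10
    · rw [Nat.toDigits_of_lt_base h]
      interval_cases n <;> decide
    · rw [Nat.toDigits_of_base_le (by norm_num) (by omega), pvDigitsVal_append,
        ih (n / 10) (by omega)]
      have h10 : n % 10 < 10 := Nat.mod_lt _ (by norm_num)
      have : (n % 10).digitChar.toNat - 48 = n % 10 := by
        set r := n % 10 with hr
        interval_cases r <;> decide
      omega

lemma toStr_inj (a b : Int) (ha : 0 ≤ a) (hb : 0 ≤ b)
    (h : PySem.Int.toStr a = PySem.Int.toStr b) : a = b := by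
  have h' : PySem.Int.toChars a = PySem.Int.toChars b := by
    rw [← PySem.Int.toList_toStr, ← PySem.Int.toList_toStr, h]
  unfold PySem.Int.toChars at h'
  rw [if_neg (by omega), if_neg (by omega)] at h'
  have := congrArg pvDigitsVal h'
  rw [pvDigitsVal_toDigits, pvDigitsVal_toDigits] at this
  omega

lemma toStr_ne (a b : Int) (ha : 0 ≤ a) (hb : 0 ≤ b) (h : a ≠ b) :
    PySem.Int.toStr a ≠ PySem.Int.toStr b := fun hc => h (toStr_inj a b ha hb hc)

-- all-empty adjacency entries for nodes c..size
def emptiesFrom (size c : Int) : List (String × List String) :=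
  (PySem.List.pyRange c (size + 1) 1).map (fun x => (PySem.Int.toStr x, ([] : List String)))

-- the common per-node description both loops compute (n = number of nodes left)
def chunks (size : Int) : Nat → Int → Int → List (String × List String)
  | 0, _, _ => []
  | n + 1, c, rem =>
      let k := max 0 (min rem (size - c))
      (PySem.Int.toStr c, (PySem.List.pyRange (c + 1) (c + 1 + k) 1).map PySem.Int.toStr)
        :: chunks size n (c + 1) (rem - k)

lemma chunks_nonpos (size : Int) : ∀ (n : Nat) (c rem : Int), rem ≤ 0 →
    n = (size + 1 - c).toNat → chunks size n c rem = emptiesFrom size c := by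
  intro n
  induction n with
  | zero =>
    intro c rem _ hn
    simp [chunks, emptiesFrom, PySem.List.pyRange_one_eq_nil (by omega : size + 1 ≤ c)]
  | succ n ih =>
    intro c rem hr hn
    have hc : c < size + 1 := by omega
    have hk : max 0 (min rem (size - c)) = 0 := by omega
    rw [chunks, emptiesFrom, PySem.List.pyRange_one_cons hc]
    simp only [hk, List.map_cons]
    rw [show c + 1 + 0 = c + 1 by ring, PySem.List.pyRange_one_eq_nil (le_refl (c+1))]
    simp only [List.map_nil, sub_zero]
    exact congrArg _ (ih (c + 1) rem hr (by omega))

lemma get?_mk_middle (pre rest : List (String × List String)) (k : String) (v : List String)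
    (hpre : k ∉ pre.map Prod.fst) :
    (PySem.Dict.mk (pre ++ (k, v) :: rest)).get? k = some v := by
  induction pre with
  | nil => simp [PySem.Dict.get?_mk_cons]
  | cons p pre ih =>
    simp only [List.map_cons, List.mem_cons] at hpre
    push_neg at hpre
    rw [List.cons_append, PySem.Dict.get?_mk_cons, if_neg (by simpa using Ne.symm hpre.1)]
    exact ih hpre.2

lemma modify_mk_middle (pre rest : List (String × List String)) (k : String)
    (v dflt : List String) (f : List String → List String)
    (hpre : k ∉ pre.map Prod.fst) (hrest : k ∉ rest.map Prod.fst) :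
    (PySem.Dict.mk (pre ++ (k, v) :: rest)).modify k dflt f =
      PySem.Dict.mk (pre ++ (k, f v) :: rest) := by
  have hget : (PySem.Dict.mk (pre ++ (k, v) :: rest)).get? k = some v :=
    get?_mk_middle pre rest k v hpre
  have hgetD : (PySem.Dict.mk (pre ++ (k, v) :: rest)).getD k dflt = v :=
    PySem.Dict.getD_of_get?_eq_some _ dflt hget
  have hcont : (PySem.Dict.mk (pre ++ (k, v) :: rest)).contains k = true := by
    rw [PySem.Dict.contains_eq_isSome_get?, hget]; rfl
  unfold PySem.Dict.modify PySem.Dict.insert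
  rw [hgetD, if_pos hcont]
  congr 1
  show (pre ++ (k, v) :: rest).map _ = _
  rw [List.map_append, List.map_cons]
  congr 1
  · rw [List.map_congr_left (g := id) ?_, List.map_id]
    intro p hp
    have : ¬ p.1 = k := by
      intro h; exact hpre (h ▸ List.mem_map_of_mem hp)
    simp [this]
  · congr 1
    · simp
    · rw [List.map_congr_left (g := id) ?_, List.map_id]
      intro p hp
      have : ¬ p.1 = k := by
        intro h; exact hrest (h ▸ List.mem_map_of_mem hp)
      simp [this]

lemma toStr_not_mem_empties (size c x : Int) (hx : 0 ≤ x) (hxc : x < c) (h1 : 0 < c) :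
    PySem.Int.toStr x ∉ (emptiesFrom size c).map Prod.fst := by
  intro hmem
  simp only [emptiesFrom, List.map_map, List.mem_map, Function.comp] at hmem
  obtain ⟨y, hy, hxy⟩ := hmem
  rw [PySem.List.mem_pyRange_one] at hy
  exact toStr_ne x y hx (by omega) (by omega) hxy.symm

-- within one node: k in-range steps of A append str(e), str(e+1), …
lemma astep_run (size : Int) : ∀ (k : Nat) (g : PySem.Dict String (List String)) (c e : Int),
    e + k ≤ size + 1 →
    (astep size)^[k] (g, c, e) =
      ((PySem.List.pyRange e (e + k) 1).foldl
        (fun h x => h.modify (PySem.Int.toStr c) [] (fun l => l ++ [PySem.Int.toStr x])) g,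
       c, e + k) := by
  intro k
  induction k with
  | zero => intro g c e _; simp [PySem.List.pyRange_one_eq_nil (le_refl e)]
  | succ k ih =>
    intro g c e he
    have he' : ¬ (e > size) := by omega
    rw [Function.iterate_succ_apply]
    have hstep : astep size (g, c, e) =
        (g.modify (PySem.Int.toStr c) [] (fun l => l ++ [PySem.Int.toStr e]), c, e + 1) := by
      simp [astep, he']
    rw [hstep, ih _ c (e + 1) (by omega)]
    rw [PySem.List.pyRange_one_cons (by omega : e < e + ((k + 1 : Nat) : Int)), List.foldl_cons]
    have harith : e + 1 + (k : Int) = e + ((k + 1 : Nat) : Int) := by omega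
    rw [harith]

-- folding those appends over the explicit dict shape
lemma modify_fold (c : Int) : ∀ (l : List Int) (pre rest : List (String × List String))
    (v : List String),
    PySem.Int.toStr c ∉ pre.map Prod.fst → PySem.Int.toStr c ∉ rest.map Prod.fst →
    l.foldl (fun h x => h.modify (PySem.Int.toStr c) [] (fun w => w ++ [PySem.Int.toStr x]))
        (PySem.Dict.mk (pre ++ (PySem.Int.toStr c, v) :: rest)) =
      PySem.Dict.mk (pre ++ (PySem.Int.toStr c, v ++ l.map PySem.Int.toStr) :: rest) := by
  intro l
  induction l with
  | nil => intro pre rest v _ _; simp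
  | cons x l ih =>
    intro pre rest v hpre hrest
    rw [List.foldl_cons, modify_mk_middle pre rest _ v [] _ hpre hrest,
      ih pre rest _ hpre hrest]
    simp

-- ===== A's loop, per-node =====
lemma afold (size : Int) : ∀ (n : Nat) (c : Int) (m : Nat) (pre : List (String × List String)),
    n = (size + 1 - c).toNat → 1 ≤ c → c ≤ size + 1 →
    2 * (m : Int) ≤ (size - c) * (size - c + 1) →
    (∀ x : Int, c ≤ x → x ≤ size → PySem.Int.toStr x ∉ pre.map Prod.fst) →
    ((astep size)^[m] (PySem.Dict.mk (pre ++ emptiesFrom size c), c, c + 1)).1.items =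
      pre ++ chunks size n c (m : Int) := by
  intro n
  induction n with
  | zero =>
    intro c m pre hn hc1 hc2 hcap hfresh
    have hceq : c = size + 1 := by omega
    have hprod : (size - c) * (size - c + 1) = 0 := by rw [hceq]; ring
    rw [hprod] at hcap
    have hm : m = 0 := by omega
    subst hm
    rw [Function.iterate_zero_apply]
    have hemp : emptiesFrom size c = [] := by
      unfold emptiesFrom; rw [PySem.List.pyRange_one_eq_nil (by omega)]; rfl
    rw [hemp, List.append_nil]
    simp [chunks]
  | succ n ih =>
    intro c m pre hn hc1 hc2 hcap hfresh
    have hc3 : c ≤ size := by omega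
    have ht0 : 0 ≤ size - c := by omega
    have hkm : min m (size - c).toNat ≤ m := min_le_left _ _
    have hkt : ((min m (size - c).toNat : Nat) : Int) ≤ size - c := by omega
    have hiter : (astep size)^[m] ((PySem.Dict.mk (pre ++ emptiesFrom size c)), c, c + 1)
        = (astep size)^[m - min m (size - c).toNat]
            ((astep size)^[min m (size - c).toNat]
              ((PySem.Dict.mk (pre ++ emptiesFrom size c)), c, c + 1)) := by
      rw [← Function.iterate_add_apply]
      congr 1
      omega
    rw [hiter, astep_run size (min m (size - c).toNat) _ c (c + 1) (by omega)]
    have hemp : emptiesFrom size c =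
        (PySem.Int.toStr c, ([] : List String)) :: emptiesFrom size (c + 1) := by
      unfold emptiesFrom; rw [PySem.List.pyRange_one_cons (by omega)]; rfl
    have hprefresh : PySem.Int.toStr c ∉ pre.map Prod.fst := hfresh c le_rfl hc3
    have hrestfresh : PySem.Int.toStr c ∉ (emptiesFrom size (c + 1)).map Prod.fst :=
      toStr_not_mem_empties size (c + 1) c (by omega) (by omega) (by omega)
    rw [hemp, modify_fold c _ pre _ [] hprefresh hrestfresh, List.nil_append]
    by_cases hcase : m - min m (size - c).toNat = 0
    · have hkm' : min m (size - c).toNat = m := by omega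
      have hkc : max 0 (min (m : Int) (size - c)) = ((min m (size - c).toNat : Nat) : Int) := by
        omega
      rw [hcase, Function.iterate_zero_apply, chunks]
      simp only []
      rw [hkc,
        chunks_nonpos size n (c + 1) ((m : Int) - ((min m (size - c).toNat : Nat) : Int))
          (by omega) (by omega)]
    · -- the node is filled completely; one rollover step, then recurse on node c+1
      have hktfull : ((min m (size - c).toNat : Nat) : Int) = size - c := by omega
      have hmge : (size - c) + 1 ≤ (m : Int) := by omega
      have hcap2 : 2 * ((size - c) + 1) ≤ (size - c) * ((size - c) + 1) := by linarith
      have ht2 : 2 ≤ size - c := by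
        have h1 : (0 : Int) < (size - c) + 1 := by omega
        have := le_of_mul_le_mul_right (by linarith : 2 * ((size - c) + 1) ≤ (size - c) * ((size - c) + 1)) h1
        omega
      have hedge : c + 1 + ((min m (size - c).toNat : Nat) : Int) = size + 1 := by omega
      rw [hedge]
      obtain ⟨r, hr⟩ : ∃ r, m - min m (size - c).toNat = r + 1 := ⟨m - min m (size - c).toNat - 1, by omega⟩
      have hroll : ∀ G : PySem.Dict String (List String),
          astep size (G, c, size + 1) = astep size (G, c + 1, c + 1 + 1) := by
        intro G
        simp only [astep]
        rw [if_pos (by omega : size + 1 > size), if_pos (by omega : size + 1 > size),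
          if_neg (by omega : ¬ (c + 1 + 1 > size)), if_neg (by omega : ¬ (c + 1 + 1 > size))]
      rw [hr, Function.iterate_succ_apply, hroll, ← Function.iterate_succ_apply]
      have hexp : (astep size)^[r + 1] = (astep size)^[m - min m (size - c).toNat] :=
        by rw [hr]
      rw [hexp]
      have hG : pre ++ (PySem.Int.toStr c,
            (PySem.List.pyRange (c + 1) (size + 1) 1).map PySem.Int.toStr) :: emptiesFrom size (c + 1)
          = (pre ++ [(PySem.Int.toStr c,
            (PySem.List.pyRange (c + 1) (size + 1) 1).map PySem.Int.toStr)]) ++ emptiesFrom size (c + 1) := by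
        simp
      rw [hG, ih (c + 1) (m - min m (size - c).toNat) _ (by omega) (by omega) (by omega)
        ?_ ?_]
      · rw [chunks]
        have hkc : max 0 (min (m : Int) (size - c)) = size - c := by omega
        have hcast : ((m - min m (size - c).toNat : Nat) : Int) = (m : Int) - (size - c) := by
          omega
        rw [hkc, hcast, show c + 1 + (size - c) = size + 1 by ring]
        simp [List.append_assoc]
      · -- capacity for node c+1
        have hring : (size - (c + 1)) * (size - (c + 1) + 1)
            = (size - c) * ((size - c) + 1) - 2 * (size - c) := by ring
        have hcast : ((m - min m (size - c).toNat : Nat) : Int) = (m : Int) - (size - c) := by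
          omega
        rw [hcast, hring]
        linarith
      · intro x hx1 hx2
        rw [List.map_append, List.mem_append]
        rintro (h | h)
        · exact hfresh x (by omega) hx2 h
        · simp only [List.map_cons, List.map_nil, List.mem_cons, List.not_mem_nil, or_false] at h
          exact toStr_ne x c (by omega) (by omega) (by omega) h

-- A's loop when num_edges = max_edges + 1: every node is filled and the one extra
-- edge appends the out-of-range node str(size+1) to node size
lemma afold_over (size : Int) : ∀ (n : Nat) (c : Int) (m : Nat) (pre : List (String × List String)),
    n = (size - c).toNat → 1 ≤ c → c ≤ size - 1 →
    2 * (m : Int) = (size - c) * (size - c + 1) + 2 →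
    (∀ x : Int, c ≤ x → x ≤ size → PySem.Int.toStr x ∉ pre.map Prod.fst) →
    ((astep size)^[m] (PySem.Dict.mk (pre ++ emptiesFrom size c), c, c + 1)).1.items =
      pre ++ (PySem.List.pyRange c size 1).map
          (fun x => (PySem.Int.toStr x, (PySem.List.pyRange (x + 1) (size + 1) 1).map PySem.Int.toStr))
        ++ [(PySem.Int.toStr size, [PySem.Int.toStr (size + 1)])] := by
  intro n
  induction n with
  | zero => intro c m pre hn hc1 hc2 hcap hfresh; omega
  | succ n ih =>
    intro c m pre hn hc1 hc2 hcap hfresh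
    by_cases hbase : n = 0
    · -- c = size - 1 : two explicit steps
      subst hbase
      have hsz : size = c + 1 := by omega
      subst hsz
      simp only [show c + 1 - c = (1 : Int) from by ring] at hcap
      have hm : m = 2 := by omega
      subst hm
      have he1 : emptiesFrom (c + 1) c =
          (PySem.Int.toStr c, ([] : List String)) :: emptiesFrom (c + 1) (c + 1) := by
        unfold emptiesFrom; rw [PySem.List.pyRange_one_cons (by omega)]; rfl
      have he2 : emptiesFrom (c + 1) (c + 1) =
          [(PySem.Int.toStr (c + 1), ([] : List String))] := by
        unfold emptiesFrom
        rw [PySem.List.pyRange_one_cons (by omega), PySem.List.pyRange_one_eq_nil (by omega)]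
        rfl
      have hne01 : PySem.Int.toStr c ∉
          ([(PySem.Int.toStr (c + 1), ([] : List String))]).map Prod.fst := by
        simp only [List.map_cons, List.map_nil, List.mem_cons, List.not_mem_nil, or_false]
        exact toStr_ne c (c + 1) (by omega) (by omega) (by omega)
      rw [show (2 : Nat) = 1 + 1 from rfl, Function.iterate_add_apply,
        astep_run (c + 1) 1 _ c (c + 1) (by push_cast; omega)]
      rw [show c + 1 + ((1 : Nat) : Int) = c + 1 + 1 from by push_cast; ring,
        PySem.List.pyRange_one_singleton, List.foldl_cons, List.foldl_nil, he1, he2,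
        modify_mk_middle pre _ _ _ _ _ (hfresh c le_rfl (by omega)) hne01, List.nil_append]
      rw [Function.iterate_one]
      have hstep2 : astep (c + 1)
          (PySem.Dict.mk (pre ++ (PySem.Int.toStr c, [PySem.Int.toStr (c + 1)]) ::
            [(PySem.Int.toStr (c + 1), ([] : List String))]), c, c + 1 + 1) =
          ((PySem.Dict.mk (pre ++ (PySem.Int.toStr c, [PySem.Int.toStr (c + 1)]) ::
            [(PySem.Int.toStr (c + 1), ([] : List String))])).modify
              (PySem.Int.toStr (c + 1)) [] (fun l => l ++ [PySem.Int.toStr (c + 1 + 1)]),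
           c + 1, c + 1 + 1 + 1) := by
        simp only [astep]
        rw [if_pos (by omega : c + 1 + 1 > c + 1), if_pos (by omega : c + 1 + 1 > c + 1)]
      rw [hstep2,
        show pre ++ (PySem.Int.toStr c, [PySem.Int.toStr (c + 1)]) ::
            [(PySem.Int.toStr (c + 1), ([] : List String))]
          = (pre ++ [(PySem.Int.toStr c, [PySem.Int.toStr (c + 1)])]) ++
            (PySem.Int.toStr (c + 1), ([] : List String)) :: [] from by simp,
        modify_mk_middle _ _ _ _ _ _ ?_ (by simp), List.nil_append]
      · rw [PySem.List.pyRange_one_singleton, List.map_cons, List.map_nil,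
          PySem.List.pyRange_one_singleton, List.map_cons, List.map_nil]
      · rw [List.map_append]
        simp only [List.mem_append, List.map_cons, List.map_nil, List.mem_cons,
          List.not_mem_nil, or_false]
        rintro (h | h)
        · exact hfresh (c + 1) (by omega) (by omega) h
        · exact toStr_ne (c + 1) c (by omega) (by omega) (by omega) h
    · -- c ≤ size - 2 : fill node c, roll over, recurse
      have hc3 : c ≤ size - 2 := by omega
      have ht2 : 2 ≤ size - c := by omega
      have htt : (1 : Int) * (size - c) ≤ (size - c) * (size - c) :=
        mul_le_mul_of_nonneg_right (by omega) (by omega)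
      have hrr : (size - c) * (size - c + 1) = (size - c) * (size - c) + (size - c) := by ring
      have hmt : (size - c) + 1 ≤ (m : Int) := by linarith
      have hkfull : ((min m (size - c).toNat : Nat) : Int) = size - c := by omega
      have hiter : (astep size)^[m] ((PySem.Dict.mk (pre ++ emptiesFrom size c)), c, c + 1)
          = (astep size)^[m - min m (size - c).toNat]
              ((astep size)^[min m (size - c).toNat]
                ((PySem.Dict.mk (pre ++ emptiesFrom size c)), c, c + 1)) := by
        rw [← Function.iterate_add_apply]
        congr 1
        omega
      rw [hiter, astep_run size (min m (size - c).toNat) _ c (c + 1) (by omega)]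
      have hemp : emptiesFrom size c =
          (PySem.Int.toStr c, ([] : List String)) :: emptiesFrom size (c + 1) := by
        unfold emptiesFrom; rw [PySem.List.pyRange_one_cons (by omega)]; rfl
      rw [hemp, modify_fold c _ pre _ [] (hfresh c le_rfl (by omega))
        (toStr_not_mem_empties size (c + 1) c (by omega) (by omega) (by omega)),
        List.nil_append]
      have hedge : c + 1 + ((min m (size - c).toNat : Nat) : Int) = size + 1 := by omega
      rw [hedge]
      obtain ⟨r, hr⟩ : ∃ r, m - min m (size - c).toNat = r + 1 := ⟨m - min m (size - c).toNat - 1, by omega⟩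
      have hroll : ∀ G : PySem.Dict String (List String),
          astep size (G, c, size + 1) = astep size (G, c + 1, c + 1 + 1) := by
        intro G
        simp only [astep]
        rw [if_pos (by omega : size + 1 > size), if_pos (by omega : size + 1 > size),
          if_neg (by omega : ¬ (c + 1 + 1 > size)), if_neg (by omega : ¬ (c + 1 + 1 > size))]
      rw [hr, Function.iterate_succ_apply, hroll, ← Function.iterate_succ_apply]
      have hexp : (astep size)^[r + 1] = (astep size)^[m - min m (size - c).toNat] :=
        by rw [hr]
      rw [hexp]
      have hG : pre ++ (PySem.Int.toStr c,
            (PySem.List.pyRange (c + 1) (size + 1) 1).map PySem.Int.toStr) :: emptiesFrom size (c + 1)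
          = (pre ++ [(PySem.Int.toStr c,
            (PySem.List.pyRange (c + 1) (size + 1) 1).map PySem.Int.toStr)]) ++ emptiesFrom size (c + 1) := by
        simp
      rw [hG, ih (c + 1) (m - min m (size - c).toNat) _ (by omega) (by omega) (by omega)
        ?_ ?_]
      · rw [PySem.List.pyRange_one_cons (by omega : c < size), List.map_cons]
        simp [List.append_assoc]
      · have hring : (size - (c + 1)) * (size - (c + 1) + 1)
            = (size - c) * ((size - c) + 1) - 2 * (size - c) := by ring
        have hcast : ((m - min m (size - c).toNat : Nat) : Int) = (m : Int) - (size - c) := by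
          omega
        rw [hcast, hring]
        linarith
      · intro x hx1 hx2
        rw [List.map_append, List.mem_append]
        rintro (h | h)
        · exact hfresh x (by omega) hx2 h
        · simp only [List.map_cons, List.map_nil, List.mem_cons, List.not_mem_nil, or_false] at h
          exact toStr_ne x c (by omega) (by omega) (by omega) h

-- the last entry of the per-node description is always (str(size), [])
lemma chunks_getLast (size : Int) : ∀ (n : Nat) (c rem : Int), 1 ≤ n → c + n = size + 1 →
    (chunks size n c rem).getLast? = some (PySem.Int.toStr size, []) := by
  intro n
  induction n with
  | zero => intro c rem h1 _; omega
  | succ n ih =>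
    intro c rem _ hsum
    by_cases hn : n = 0
    · subst hn
      have hc : c = size := by omega
      have hk : max 0 (min rem (size - c)) = 0 := by omega
      rw [chunks]
      simp only [hk]
      rw [show c + 1 + 0 = c + 1 from by ring,
        PySem.List.pyRange_one_eq_nil (le_refl (c + 1))]
      simp [hc, chunks]
    · rw [chunks, List.getLast?_cons, ih (c + 1) _ (by omega) (by omega)]
      rfl

-- ===== B's loop, per-node =====
lemma bfold (size : Int) : ∀ (n : Nat) (c rem : Int) (d : PySem.Dict String (List String)),
    n = (size + 1 - c).toNat → 1 ≤ c →
    (∀ x : Int, c ≤ x → x ≤ size → d.contains (PySem.Int.toStr x) = false) →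
    ((PySem.List.pyRange c (size + 1) 1).foldl (bstep size) (d, rem)).1.items =
      d.items ++ chunks size n c rem := by
  intro n
  induction n with
  | zero =>
    intro c rem d hn hc hfresh
    rw [PySem.List.pyRange_one_eq_nil (by omega), List.foldl_nil, chunks, List.append_nil]
  | succ n ih =>
    intro c rem d hn hc hfresh
    rw [PySem.List.pyRange_one_cons (by omega : c < size + 1), List.foldl_cons]
    have hcontc : d.contains (PySem.Int.toStr c) = false := hfresh c le_rfl (by omega)
    have hb : bstep size (d, rem) c =
        (d.insert (PySem.Int.toStr c)
          ((PySem.List.pyRange (c + 1) (c + 1 + max 0 (min rem (size - c))) 1).map PySem.Int.toStr),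
         rem - max 0 (min rem (size - c))) := rfl
    rw [hb, ih (c + 1) (rem - max 0 (min rem (size - c))) _ (by omega) (by omega) ?_]
    · rw [PySem.Dict.items_insert_of_not_contains _ _ hcontc, chunks]
      simp [List.append_assoc]
    · intro x hx1 hx2
      rw [PySem.Dict.contains_insert]
      have hne : (PySem.Int.toStr x == PySem.Int.toStr c) = false := by
        rw [beq_eq_false_iff_ne]
        exact toStr_ne x c (by omega) (by omega) (by omega)
      rw [hne, hfresh x (by omega) hx2]
      rfl

lemma init_graph (size : Int) :
    (PySem.List.pyRange 1 (size + 1) 1).foldl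
        (fun d k => d.insert (PySem.Int.toStr k) []) PySem.Dict.empty =
      PySem.Dict.mk (emptiesFrom size 1) := by
  apply PySem.Dict.ext
  rw [PySem.Dict.items_foldl_insert_fresh _ PySem.Int.toStr (fun _ => ([] : List String)) _
    (fun a _ => PySem.Dict.contains_empty _) ?_]
  · rfl
  · refine List.Nodup.map_on ?_ (PySem.List.nodup_pyRange_one 1 (size + 1))
    intro x hx y hy hxy
    rw [PySem.List.mem_pyRange_one] at hx hy
    exact toStr_inj x y (by omega) (by omega) hxy

lemma foldl_range_iterate {α : Type} (f : α → α) : ∀ (n : Nat) (a : α),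
    (List.range n).foldl (fun s _ => f s) a = f^[n] a := by
  intro n
  induction n with
  | zero => intro a; simp
  | succ n ih =>
    intro a
    rw [List.range_succ, List.foldl_append, ih, List.foldl_cons, List.foldl_nil,
      Function.iterate_succ_apply']

-- arithmetic consequence of Pre_ ∧ ¬D_ (atoms only, no re-simulation)
lemma cap_of_pre (size saturation : Int)
    (hpre : Pre_generate_py size saturation) (hnd : ¬ D_generate_py size saturation) :
    PySem.Int.floordiv (saturation * PySem.Int.floordiv (size * (size - 1)) 2) 100 ≤ 0 ∨
    (1 ≤ size ∧
      2 * PySem.Int.floordiv (saturation * PySem.Int.floordiv (size * (size - 1)) 2) 100 ≤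
        (size - 1) * size) := by
  unfold Pre_generate_py at hpre
  unfold D_generate_py at hnd
  have hdvd : (2 : Int) ∣ size * (size - 1) := by
    have h := Int.even_mul_succ_self (size - 1)
    have : (size - 1) * (size - 1 + 1) = size * (size - 1) := by ring
    rw [this] at h
    exact h.two_dvd
  have hMM : PySem.Int.floordiv (size * (size - 1)) 2 = size * (size - 1) / 2 :=
    PySem.Int.floordiv_eq_ediv_of_pos (by norm_num)
  have hM2 : 2 * (size * (size - 1) / 2) = size * (size - 1) := by
    rw [mul_comm]
    exact Int.ediv_mul_cancel hdvd
  rw [hMM]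
  rcases hpre with h | ⟨h2, hlt⟩
  · left
    have : PySem.Int.floordiv (saturation * (size * (size - 1) / 2)) 100 < 1 := by
      rw [PySem.Int.floordiv_lt_iff_lt_mul (by norm_num)]
      linarith
    omega
  · right
    have hE2 : PySem.Int.floordiv (saturation * (size * (size - 1) / 2)) 100 <
        size * (size - 1) / 2 + 1 := by
      rw [PySem.Int.floordiv_lt_iff_lt_mul (by norm_num)]
      by_cases hge : (size * (size - 1) / 2 + 1) * 100 ≤ saturation * (size * (size - 1) / 2)
      · exfalso
        have hX : (saturation - 100) * (size * (size - 1) / 2)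
            = saturation * (size * (size - 1) / 2) - 100 * (size * (size - 1) / 2) := by ring
        refine hnd ⟨h2, ?_, ?_⟩
        · rw [hX]; linarith
        · rw [hX]; linarith
      · linarith [lt_of_not_ge hge]
    have hEM : PySem.Int.floordiv (saturation * (size * (size - 1) / 2)) 100 ≤
        size * (size - 1) / 2 := Int.lt_add_one_iff.mp hE2
    refine ⟨by linarith, ?_⟩
    have hr : (size - 1) * size = size * (size - 1) := by ring
    rw [hr]
    linarith

-- both loops produce the common per-node description
lemma core (size E : Int)
    (hcap : E ≤ 0 ∨ (1 ≤ size ∧ 2 * E ≤ (size - 1) * size)) :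
    ((List.range E.toNat).foldl (fun st _ => astep size st)
        (PySem.Dict.mk (emptiesFrom size 1), 1, 2)).1.items =
      ((PySem.List.pyRange 1 (size + 1) 1).foldl (bstep size)
        (PySem.Dict.empty, E)).1.items := by
  by_cases hs : size ≤ 0
  · have hE0 : E ≤ 0 := by
      rcases hcap with h | ⟨h1, _⟩
      · exact h
      · omega
    have hE0' : E.toNat = 0 := by omega
    rw [hE0', List.range_zero, List.foldl_nil,
      PySem.List.pyRange_one_eq_nil (by omega), List.foldl_nil]
    show (PySem.Dict.mk (emptiesFrom size 1)).items = PySem.Dict.empty.items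
    unfold emptiesFrom
    rw [PySem.List.pyRange_one_eq_nil (by omega)]
    rfl
  · have hprod0 : 0 ≤ (size - 1) * size := mul_nonneg (by omega) (by omega)
    have hcapA : 2 * ((E.toNat : Nat) : Int) ≤ (size - 1) * (size - 1 + 1) := by
      rw [show (size - 1) * (size - 1 + 1) = (size - 1) * size from by ring]
      rcases hcap with h | ⟨_, h⟩
      · have : E.toNat = 0 := by omega
        rw [this]
        simpa using hprod0
      · by_cases h0 : E ≤ 0
        · have : E.toNat = 0 := by omega
          rw [this]
          simpa using hprod0
        · have : ((E.toNat : Nat) : Int) = E := by omega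
          rw [this]
          exact h
    rw [foldl_range_iterate (astep size) E.toNat _,
      show (2 : Int) = 1 + 1 from rfl,
      ← List.nil_append (emptiesFrom size 1),
      afold size size.toNat 1 E.toNat [] (by omega) le_rfl (by omega) hcapA
        (by intro x _ _ h; simp at h),
      bfold size size.toNat 1 E PySem.Dict.empty (by omega) le_rfl
        (by intro x _ _; exact PySem.Dict.contains_empty _)]
    show chunks size size.toNat 1 ((E.toNat : Nat) : Int) = [] ++ chunks size size.toNat 1 E
    rw [List.nil_append]
    by_cases h0 : E ≤ 0
    · rw [chunks_nonpos size size.toNat 1 ((E.toNat : Nat) : Int) (by omega) (by omega),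
        chunks_nonpos size size.toNat 1 E (by omega) (by omega)]
    · rw [show ((E.toNat : Nat) : Int) = E from by omega]

-- ===== VERDICT (by name: the statement is the Claim_ definition above) =====
theorem generate_py_spec : Claim_unchanged_generate_py := by
  intro size saturation _ hpre
  unfold Spec_generate_py
  intro hnd
  have hcap := cap_of_pre size saturation hpre hnd
  simp only [generate_py, generate_py_alt]
  rw [init_graph]
  exact core size _ hcap

theorem generate_py_changed : Claim_changed_generate_py := by
  unfold Claim_changed_generate_py; decide

theorem generate_py_tight : Claim_exact_generate_py := by
  intro size saturation _ hpre hd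
  obtain ⟨h2, hd1, hd2⟩ := hd
  have hdvd : (2 : Int) ∣ size * (size - 1) := by
    have h := Int.even_mul_succ_self (size - 1)
    have : (size - 1) * (size - 1 + 1) = size * (size - 1) := by ring
    rw [this] at h
    exact h.two_dvd
  have hMM : PySem.Int.floordiv (size * (size - 1)) 2 = size * (size - 1) / 2 :=
    PySem.Int.floordiv_eq_ediv_of_pos (by norm_num)
  have hM2 : 2 * (size * (size - 1) / 2) = size * (size - 1) := by
    rw [mul_comm]
    exact Int.ediv_mul_cancel hdvd
  have hX : (saturation - 100) * (size * (size - 1) / 2)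
      = saturation * (size * (size - 1) / 2) - 100 * (size * (size - 1) / 2) := by ring
  have hq1 : 1 ≤ size * (size - 1) / 2 := by
    have : 2 ≤ size * (size - 1) := by nlinarith
    omega
  have hE : PySem.Int.floordiv (saturation * (size * (size - 1) / 2)) 100
      = size * (size - 1) / 2 + 1 := by
    have hlo : size * (size - 1) / 2 + 1 ≤
        PySem.Int.floordiv (saturation * (size * (size - 1) / 2)) 100 := by
      rw [PySem.Int.le_floordiv_iff_mul_le (by norm_num)]
      linarith [hX ▸ hd1]
    have hhi : PySem.Int.floordiv (saturation * (size * (size - 1) / 2)) 100 <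
        size * (size - 1) / 2 + 2 := by
      rw [PySem.Int.floordiv_lt_iff_lt_mul (by norm_num)]
      linarith [hX ▸ hd2]
    omega
  intro hAB
  have hA : generate_py size saturation =
      [] ++ (PySem.List.pyRange 1 size 1).map
          (fun x => (PySem.Int.toStr x, (PySem.List.pyRange (x + 1) (size + 1) 1).map PySem.Int.toStr))
        ++ [(PySem.Int.toStr size, [PySem.Int.toStr (size + 1)])] := by
    simp only [generate_py]
    rw [init_graph, foldl_range_iterate, hMM, hE,
      show (2 : Int) = 1 + 1 from rfl,
      ← List.nil_append (emptiesFrom size 1)]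
    have hcap' : 2 * (((size * (size - 1) / 2 + 1).toNat : Nat) : Int)
        = (size - 1) * (size - 1 + 1) + 2 := by
      have h1 : (((size * (size - 1) / 2 + 1).toNat : Nat) : Int)
          = size * (size - 1) / 2 + 1 := by omega
      rw [h1, show (size - 1) * (size - 1 + 1) = size * (size - 1) from by ring]
      linarith
    exact afold_over size (size - 1).toNat 1 (size * (size - 1) / 2 + 1).toNat []
      (by omega) le_rfl (by omega) (by rw [show (size : Int) - 1 = size - (1 : Int) from rfl]; exact hcap') (by intro x _ _ h; simp at h)
  have hB : (generate_py_alt size saturation).getLast? = some (PySem.Int.toStr size, []) := by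
    simp only [generate_py_alt]
    rw [bfold size size.toNat 1 _ PySem.Dict.empty (by omega) le_rfl
      (by intro x _ _; exact PySem.Dict.contains_empty _),
      show PySem.Dict.empty.items = ([] : List (String × List String)) from rfl,
      List.nil_append]
    exact chunks_getLast size size.toNat 1 _ (by omega) (by omega)
  have hAlast : (generate_py size saturation).getLast? =
      some (PySem.Int.toStr size, [PySem.Int.toStr (size + 1)]) := by
    rw [hA, List.nil_append, List.getLast?_concat]
  rw [hAB, hB] at hAlast
  simp at hAlast
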